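-- pv_equiv track=rewrite | github.com/evelyngoodman/CSE163 | HW1/hw1.py | mode_digit
-- ===== SOURCE A (Python) =====
-- def mode_digit(n):
--     """
--     returns the digit that appears most frequently in that number,
--     if there are two numbers with same frequency, return the digit
--     with the greatest value.
--     """
--     counts = {}
--     n = abs(n)
--     if n == 0:
--         return 0
--     else:
--         while n > 0:
--             digit = n % 10
--             if digit in counts:
--                 counts[digit] += 1
--             else:
--                 counts[digit] = 1
--             n //= 10
--     max_key = 0
--     max_value = 0
--     for item in counts:
--         if counts.get(item) > max_value:
--             max_value = counts.get(item)
--             max_key = item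
--         elif counts.get(item) == max_value:
--             max_key = max(item, max_key)
--     return max_key
-- ===== SOURCE B (Python) =====
-- def mode_digit(n):
--     """
--     returns the digit that appears most frequently in that number,
--     if there are two numbers with same frequency, return the digit
--     with the greatest value.
--     """
--     def count_d(m, d):
--         c = 0
--         while m > 0:
--             if m % 10 == d:
--                 c += 1
--             m //= 10
--         return c
--
--     m = abs(n)
--     best = 0
--     ans = 0
--     for d in range(9, -1, -1):
--         c = count_d(m, d)
--         if c > best:
--             best = c
--             ans = d
--     return ans
-- ===== Notes on version B (the rewrite author's own statement) =====
-- stated objective: alternative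
-- what changed: A builds a digit-frequency dict in one pass and then scans the dict with an explicit max() tie-break; B keeps no frequency table at all: it loops over the ten candidate digits 9..0 and for each runs its own counting pass over the number, keeping the first strict improvement, so ties resolve to the greatest digit and no special case for a zero argument is needed.
import Mathlib
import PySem

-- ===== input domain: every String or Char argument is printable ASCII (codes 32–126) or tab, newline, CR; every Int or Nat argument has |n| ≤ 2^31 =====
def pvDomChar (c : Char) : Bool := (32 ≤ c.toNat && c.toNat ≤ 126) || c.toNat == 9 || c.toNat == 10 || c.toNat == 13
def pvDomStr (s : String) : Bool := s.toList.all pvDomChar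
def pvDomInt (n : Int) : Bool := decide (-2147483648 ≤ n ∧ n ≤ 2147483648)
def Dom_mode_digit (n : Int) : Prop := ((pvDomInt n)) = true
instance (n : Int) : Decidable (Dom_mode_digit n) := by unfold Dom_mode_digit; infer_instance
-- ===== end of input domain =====

-- B keeps no frequency table: it loops over candidate digits 9..0 and counts each digit by its
-- own pass over the number, keeping the first strict improvement; return value only.

-- termination fact shared by the digit loops (cited by name in decreasing_by)
theorem pv_div10_lt (n : Int) (h : 0 < n) : (PySem.Int.floordiv n 10).toNat < n.toNat := by
  rw [PySem.Int.floordiv_eq_ediv_of_pos (by omega)]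
  omega

-- ===== PORT A =====
-- while n > 0: digit = n % 10; counts[digit] += 1 (or = 1); n //= 10
-- counts.get(item): every iterated key is present, so dict.get(item) is its value; ported as getD (exact here).
def mode_digit_loop (n : Int) (counts : PySem.Dict Int Int) : PySem.Dict Int Int :=
  if h : 0 < n then
    mode_digit_loop (PySem.Int.floordiv n 10)
      (if counts.contains (PySem.Int.mod n 10) then
        counts.insert (PySem.Int.mod n 10) (counts.getD (PySem.Int.mod n 10) 0 + 1)
       else counts.insert (PySem.Int.mod n 10) 1)
  else counts
termination_by n.toNat
decreasing_by exact pv_div10_lt n h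

def mode_digit (n : Int) : Int :=
  let m := |n|
  if m = 0 then 0
  else
    let counts := mode_digit_loop m PySem.Dict.empty
    let r := counts.keys.foldl (fun s item =>
        if counts.getD item 0 > s.2 then (item, counts.getD item 0)
        else if counts.getD item 0 = s.2 then (max item s.1, s.2)
        else s) ((0 : Int), (0 : Int))
    r.1

-- ===== PORT B =====
-- count_d(m, d): c = 0; while m > 0: if m % 10 == d: c += 1; m //= 10; return c
def mode_digit_alt_count (m d c : Int) : Int :=
  if h : 0 < m then
    mode_digit_alt_count (PySem.Int.floordiv m 10) d
      (if PySem.Int.mod m 10 = d then c + 1 else c)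
  else c
termination_by m.toNat
decreasing_by exact pv_div10_lt m h

-- for d in range(9, -1, -1): c = count_d(m, d); if c > best: best, ans = c, d
def mode_digit_alt (n : Int) : Int :=
  let m := |n|
  let r := (PySem.List.pyRange 9 (-1) (-1)).foldl (fun s d =>
      let c := mode_digit_alt_count m d 0
      if c > s.2 then (d, c) else s) ((0 : Int), (0 : Int))
  r.1

-- ===== PRECONDITION & SPEC =====
def Spec_mode_digit (n : Int) (out : Int) : Prop := out = mode_digit_alt n
instance (n : Int) (out : Int) : Decidable (Spec_mode_digit n out) := by unfold Spec_mode_digit; infer_instance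

-- ===== CLAIM (what is proved, stated in full; the proofs are below) =====
def Claim_equal_mode_digit : Prop := ∀ (n : Int), Dom_mode_digit n → Spec_mode_digit n (mode_digit n)

-- ===== LEMMAS AND PROOFS =====

-- reference digit-count function: cntD n k = number of decimal digits of n (n ≥ 0 intended) equal to k
def cntD (n k : Int) : Int :=
  if h : 0 < n then
    (if PySem.Int.mod n 10 = k then 1 else 0) + cntD (PySem.Int.floordiv n 10) k
  else 0
termination_by n.toNat
decreasing_by exact pv_div10_lt n h

theorem cntD_nonneg (n k : Int) : 0 ≤ cntD n k := by
  induction n using cntD.induct with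
  | case1 n h ih => rw [cntD]; simp only [dif_pos h]; split_ifs <;> omega
  | case2 n h => rw [cntD]; simp [h]

theorem cntD_pos_range (n k : Int) (h : 0 < cntD n k) : 0 ≤ k ∧ k < 10 := by
  induction n using cntD.induct with
  | case1 n hn ih =>
    rw [cntD] at h; simp only [dif_pos hn] at h
    by_cases he : PySem.Int.mod n 10 = k
    · have := PySem.Int.mod_nonneg n (b := 10) (by omega)
      have := PySem.Int.mod_lt n (b := 10) (by omega)
      omega
    · simp only [if_neg he, zero_add] at h; exact ih h
  | case2 n hn => rw [cntD] at h; simp [hn] at h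

theorem cntD_self_pos (n : Int) (h : 0 < n) : 0 < cntD n (PySem.Int.mod n 10) := by
  rw [cntD]; simp only [dif_pos h, if_true]
  have := cntD_nonneg (PySem.Int.floordiv n 10) (PySem.Int.mod n 10)
  omega

-- B's per-digit counting pass computes cntD
theorem alt_count_eq (m d c : Int) : mode_digit_alt_count m d c = c + cntD m d := by
  induction m, c using mode_digit_alt_count.induct (d := d) with
  | case1 m c h ih =>
    simp only [dite_eq_ite] at ih
    rw [mode_digit_alt_count, dif_pos h, ih]
    conv_rhs => rw [cntD, dif_pos h]
    split_ifs <;> omega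
  | case2 m c h =>
    rw [mode_digit_alt_count, cntD]; simp [h]

-- A-side loop: dict lookups are exactly cntD-counts
theorem loopA_getD (n : Int) (counts : PySem.Dict Int Int) : ∀ (k : Int),
    (mode_digit_loop n counts).getD k 0 = counts.getD k 0 + cntD n k := by
  induction n, counts using mode_digit_loop.induct with
  | case1 n counts h ih =>
    intro k
    rw [mode_digit_loop]; rw [dif_pos h]
    rw [cntD]; rw [dif_pos h]
    by_cases hc : counts.contains (PySem.Int.mod n 10) = true
    · simp only [hc, if_true, dif_pos] at ih ⊢
      rw [ih, PySem.Dict.getD_insert]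
      split_ifs with h1 h2 <;> simp_all
      omega
    · have h0 : counts.getD (PySem.Int.mod n 10) 0 = 0 :=
        PySem.Dict.getD_of_not_contains _ _ (by simpa using hc)
      simp only [hc, if_false, dif_neg, Bool.false_eq_true, not_false_iff] at ih ⊢
      rw [ih, PySem.Dict.getD_insert]
      split_ifs with h1 h2 <;> simp_all
  | case2 n counts h =>
    intro k
    rw [mode_digit_loop, cntD]; simp [h]

theorem loopA_mem_keys (n : Int) (counts : PySem.Dict Int Int) : ∀ (k : Int),
    k ∈ (mode_digit_loop n counts).keys ↔ k ∈ counts.keys ∨ 0 < cntD n k := by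
  induction n, counts using mode_digit_loop.induct with
  | case1 n counts h ih =>
    intro k
    rw [mode_digit_loop]; rw [dif_pos h]
    rw [cntD]; rw [dif_pos h]
    have hnn := cntD_nonneg (PySem.Int.floordiv n 10) k
    have hstep : ∀ v : Int,
        (k ∈ (counts.insert (PySem.Int.mod n 10) v).keys ↔ k = PySem.Int.mod n 10 ∨ k ∈ counts.keys) :=
      fun v => PySem.Dict.mem_keys_insert counts _ k v
    by_cases hc : counts.contains (PySem.Int.mod n 10) = true <;>
      [simp only [hc, if_true, dif_pos] at ih ⊢;
       simp only [hc, if_false, dif_neg, Bool.false_eq_true, not_false_iff] at ih ⊢] <;>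
    · rw [ih, hstep]
      constructor
      · rintro ((rfl | hk) | hp)
        · right; rw [if_pos rfl]; omega
        · left; exact hk
        · right; split_ifs <;> omega
      · rintro (hk | hp)
        · left; right; exact hk
        · by_cases he : PySem.Int.mod n 10 = k
          · left; left; omega
          · right; rw [if_neg he] at hp; omega
  | case2 n counts h =>
    intro k
    rw [mode_digit_loop, cntD]; simp [h]

-- running max of c over a list
def pvMaxV (c : Int → Int) (base : Int) (L : List Int) : Int :=
  L.foldl (fun v k => max v (c k)) base

theorem pvMaxV_base_le (c : Int → Int) : ∀ (L : List Int) (base : Int), base ≤ pvMaxV c base L := by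
  intro L
  induction L with
  | nil => intro base; simp [pvMaxV]
  | cons x xs ih =>
    intro base
    have := ih (max base (c x))
    simp only [pvMaxV, List.foldl_cons] at *
    omega

theorem pvMaxV_mem_le (c : Int → Int) : ∀ (L : List Int) (base k : Int), k ∈ L → c k ≤ pvMaxV c base L := by
  intro L
  induction L with
  | nil => simp
  | cons x xs ih =>
    intro base k hk
    rcases List.mem_cons.mp hk with rfl | hk
    · have := pvMaxV_base_le c xs (max base (c k))
      simp only [pvMaxV, List.foldl_cons] at *; omega
    · exact ih _ _ hk

theorem pvMaxV_cases (c : Int → Int) : ∀ (L : List Int) (base : Int),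
    pvMaxV c base L = base ∨ ∃ k ∈ L, pvMaxV c base L = c k := by
  intro L
  induction L with
  | nil => intro base; left; simp [pvMaxV]
  | cons x xs ih =>
    intro base
    simp only [pvMaxV, List.foldl_cons]
    rcases ih (max base (c x)) with h | ⟨k, hk, h⟩
    · simp only [pvMaxV] at h; rw [h]
      rcases le_total base (c x) with hle | hle
      · right; exact ⟨x, by simp, by omega⟩
      · left; omega
    · right; exact ⟨k, by simp [hk], h⟩

-- step functions of the two selection folds (definitionally the lambdas in the ports)
def pvStepA (c : Int → Int) (s : Int × Int) (k : Int) : Int × Int :=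
  if c k > s.2 then (k, c k) else if c k = s.2 then (max k s.1, s.2) else s

def pvStepB (c : Int → Int) (s : Int × Int) (d : Int) : Int × Int :=
  if c d > s.2 then (d, c d) else s

-- A's selection fold characterised
theorem foldA_spec (c : Int → Int) (K : List Int) : ∀ (mk mv : Int),
    (∀ k ∈ K, 1 ≤ c k) → 0 ≤ mv → (0 < mv → c mk = mv) →
    (K.foldl (pvStepA c) (mk, mv)).2 = pvMaxV c mv K ∧
    (0 < (K.foldl (pvStepA c) (mk, mv)).2 →
      c (K.foldl (pvStepA c) (mk, mv)).1 = (K.foldl (pvStepA c) (mk, mv)).2) ∧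
    (mv = (K.foldl (pvStepA c) (mk, mv)).2 → mk ≤ (K.foldl (pvStepA c) (mk, mv)).1) ∧
    (∀ k ∈ K, c k = (K.foldl (pvStepA c) (mk, mv)).2 → k ≤ (K.foldl (pvStepA c) (mk, mv)).1) ∧
    ((K.foldl (pvStepA c) (mk, mv)).1 = mk ∨ (K.foldl (pvStepA c) (mk, mv)).1 ∈ K) := by
  induction K with
  | nil =>
    intro mk mv h1 h2 h3
    refine ⟨by simp [pvMaxV], fun h => h3 h, fun _ => le_refl _, by simp, Or.inl rfl⟩
  | cons x xs ih =>
    intro mk mv h1 h2 h3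
    have hx : 1 ≤ c x := h1 x (by simp)
    have hxs : ∀ k ∈ xs, 1 ≤ c k := fun k hk => h1 k (by simp [hk])
    simp only [List.foldl_cons]
    have hMV : ∀ b : Int, pvMaxV c mv (x :: xs) = pvMaxV c (max mv (c x)) xs := by
      intro _; simp [pvMaxV]
    by_cases hgt : c x > mv
    · rw [show pvStepA c (mk, mv) x = (x, c x) from by simp [pvStepA, hgt]]
      obtain ⟨i1, i2, i3, i4, i5⟩ := ih x (c x) hxs (by omega) (fun _ => rfl)
      have hb : pvMaxV c (c x) xs = pvMaxV c (max mv (c x)) xs := by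
        rw [show max mv (c x) = c x from by omega]
      have hge := pvMaxV_base_le c xs (c x)
      refine ⟨by rw [i1, hMV 0]; exact hb, i2, ?_, ?_, ?_⟩
      · intro hmv; rw [i1] at hmv; omega
      · intro k hk hck
        rcases List.mem_cons.mp hk with rfl | hk
        · exact i3 hck
        · exact i4 k hk hck
      · rcases i5 with h | h
        · right; simp [h]
        · right; simp [h]
    · by_cases heq : c x = mv
      · rw [show pvStepA c (mk, mv) x = (max x mk, mv) from by simp [pvStepA, heq]]
        have hmvpos : 0 < mv := by omega
        have h3' : 0 < mv → c (max x mk) = mv := by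
          intro hp
          rcases max_choice x mk with h | h <;> rw [h]
          · exact heq
          · exact h3 hp
        obtain ⟨i1, i2, i3, i4, i5⟩ := ih (max x mk) mv hxs h2 h3'
        have hb : max mv (c x) = mv := by omega
        refine ⟨by rw [i1, hMV 0, hb], i2, ?_, ?_, ?_⟩
        · intro hmv; have := i3 hmv; omega
        · intro k hk hck
          rcases List.mem_cons.mp hk with rfl | hk
          · have : mv = (xs.foldl (pvStepA c) (max k mk, mv)).2 := by omega
            have := i3 this; omega
          · exact i4 k hk hck
        · rcases i5 with h | h
          · rcases max_choice x mk with hm | hm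
            · right; rw [h, hm]; exact List.mem_cons_self
            · left; rw [h, hm]
          · right; simp [h]
      · rw [show pvStepA c (mk, mv) x = (mk, mv) from by
          simp only [pvStepA, if_neg hgt, if_neg heq]]
        obtain ⟨i1, i2, i3, i4, i5⟩ := ih mk mv hxs h2 h3
        have hb : max mv (c x) = mv := by omega
        have hge := pvMaxV_base_le c xs mv
        refine ⟨by rw [i1, hMV 0, hb], i2, i3, ?_, ?_⟩
        · intro k hk hck
          rcases List.mem_cons.mp hk with rfl | hk
          · rw [i1] at hck; omega
          · exact i4 k hk hck
        · rcases i5 with h | h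
          · left; exact h
          · right; simp [h]

-- B's selection fold characterised (ds strictly descending)
theorem foldB_spec (c : Int → Int) : ∀ (ds : List Int) (ans best : Int),
    ds.Pairwise (· > ·) → 0 ≤ best → (0 < best → c ans = best) →
    (0 < best → ∀ d ∈ ds, d < ans) →
    (ds.foldl (pvStepB c) (ans, best)).2 = pvMaxV c best ds ∧
    (0 < (ds.foldl (pvStepB c) (ans, best)).2 →
      c (ds.foldl (pvStepB c) (ans, best)).1 = (ds.foldl (pvStepB c) (ans, best)).2) ∧
    (best = (ds.foldl (pvStepB c) (ans, best)).2 → (ds.foldl (pvStepB c) (ans, best)).1 = ans) ∧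
    (∀ d ∈ ds, 0 < (ds.foldl (pvStepB c) (ans, best)).2 →
      c d = (ds.foldl (pvStepB c) (ans, best)).2 → d ≤ (ds.foldl (pvStepB c) (ans, best)).1) ∧
    ((ds.foldl (pvStepB c) (ans, best)).1 = ans ∨ (ds.foldl (pvStepB c) (ans, best)).1 ∈ ds) := by
  intro ds
  induction ds with
  | nil =>
    intro ans best h1 h2 h3 h4
    refine ⟨by simp [pvMaxV], fun h => h3 h, fun _ => rfl, by simp, Or.inl rfl⟩
  | cons d ds ih =>
    intro ans best hpw h2 h3 h4
    have hd : ∀ e ∈ ds, e < d := fun e he => List.rel_of_pairwise_cons hpw he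
    have hpw' : ds.Pairwise (· > ·) := hpw.of_cons
    simp only [List.foldl_cons]
    have hMV : pvMaxV c best (d :: ds) = pvMaxV c (max best (c d)) ds := by
      simp [pvMaxV]
    by_cases hgt : c d > best
    · rw [show pvStepB c (ans, best) d = (d, c d) from by simp [pvStepB, hgt]]
      obtain ⟨i1, i2, i3, i4, i5⟩ := ih d (c d) hpw' (by omega) (fun _ => rfl) (fun _ => hd)
      have hge := pvMaxV_base_le c ds (c d)
      have hb : max best (c d) = c d := by omega
      refine ⟨by rw [i1, hMV, hb], i2, ?_, ?_, ?_⟩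
      · intro hbest; rw [i1] at hbest; omega
      · intro e he hpos hce
        rcases List.mem_cons.mp he with rfl | he
        · exact le_of_eq (i3 hce).symm
        · exact i4 e he hpos hce
      · rcases i5 with h | h
        · right; simp [h]
        · right; simp [h]
    · rw [show pvStepB c (ans, best) d = (ans, best) from by simp [pvStepB, hgt]]
      have h4' : 0 < best → ∀ e ∈ ds, e < ans := fun hp e he => h4 hp e (by simp [he])
      obtain ⟨i1, i2, i3, i4, i5⟩ := ih ans best hpw' h2 h3 h4'
      have hge := pvMaxV_base_le c ds best
      have hb : max best (c d) = best := by omega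
      refine ⟨by rw [i1, hMV, hb], i2, i3, ?_, ?_⟩
      · intro e he hpos hce
        rcases List.mem_cons.mp he with rfl | he
        · have hbr : best = (ds.foldl (pvStepB c) (ans, best)).2 := by
            rw [i1]; omega
          rw [i3 hbr]
          exact le_of_lt (h4 (by omega) e (by simp))
        · exact i4 e he hpos hce
      · rcases i5 with h | h
        · left; exact h
        · right; simp [h]

-- ===== VERDICT (by name: the statement is the Claim_ definition above) =====
theorem mode_digit_spec : Claim_equal_mode_digit := by
  intro n _
  unfold Spec_mode_digit
  have hmnn : (0 : Int) ≤ |n| := abs_nonneg n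
  have hA : ∀ h : ¬ |n| = 0, mode_digit n =
      ((mode_digit_loop |n| PySem.Dict.empty).keys.foldl
        (pvStepA (fun k => (mode_digit_loop |n| PySem.Dict.empty).getD k 0)) (0, 0)).1 := by
    intro h
    simp only [mode_digit]
    rw [if_neg h]
    rfl
  have hBstep : (fun (s : Int × Int) (d : Int) =>
      let c := mode_digit_alt_count |n| d 0
      if c > s.2 then (d, c) else s) = pvStepB (cntD |n|) := by
    funext s d
    simp only [pvStepB, alt_count_eq |n| d 0, zero_add]
  have hB : mode_digit_alt n =
      ((PySem.List.pyRange 9 (-1) (-1)).foldl (pvStepB (cntD |n|)) (0, 0)).1 := by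
    simp only [mode_digit_alt]
    rw [hBstep]
  have hpw : (PySem.List.pyRange 9 (-1) (-1)).Pairwise (· > ·) := by
    rw [PySem.List.pyRange_neg_one_eq_reverse]
    rw [List.pairwise_reverse]
    exact PySem.List.pairwise_lt_pyRange_one _ _
  obtain ⟨b1, b2, b3, b4, b5⟩ :=
    foldB_spec (cntD |n|) (PySem.List.pyRange 9 (-1) (-1)) 0 0 hpw (le_refl 0)
      (by intro h; omega) (by intro h; omega)
  by_cases hm0 : |n| = 0
  · -- |n| = 0 : A returns 0 via its special case, B's scan never fires
    have hA0 : mode_digit n = 0 := by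
      simp only [mode_digit]; rw [if_pos hm0]
    have hcB0 : ∀ d ∈ PySem.List.pyRange 9 (-1) (-1), cntD |n| d = 0 := by
      intro d _
      rw [hm0, cntD]
      rw [dif_neg (by omega)]
    have hv0 : pvMaxV (cntD |n|) 0 (PySem.List.pyRange 9 (-1) (-1)) = 0 := by
      rcases pvMaxV_cases (cntD |n|) (PySem.List.pyRange 9 (-1) (-1)) 0 with h | ⟨k, hk, h⟩
      · exact h
      · rw [h]; exact hcB0 k hk
    rw [hA0, hB]
    rw [b1, hv0] at b3
    exact (b3 rfl).symm
  · -- |n| > 0 : both selections pick the greatest digit of maximal count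
    have hpos : 0 < |n| := by omega
    have hcA : ∀ k, (mode_digit_loop |n| PySem.Dict.empty).getD k 0 = cntD |n| k := by
      intro k
      rw [loopA_getD, PySem.Dict.getD_empty]
      omega
    have hK : ∀ k, k ∈ (mode_digit_loop |n| PySem.Dict.empty).keys ↔ 0 < cntD |n| k := by
      intro k
      rw [loopA_mem_keys, PySem.Dict.keys_empty]
      simp
    obtain ⟨a1, a2, a3, a4, a5⟩ :=
      foldA_spec (fun k => (mode_digit_loop |n| PySem.Dict.empty).getD k 0)
        (mode_digit_loop |n| PySem.Dict.empty).keys 0 0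
        (by intro k hk; simp only [hcA]; have := (hK k).mp hk; omega)
        (le_refl 0) (by intro h; omega)
    -- both running maxima equal the maximum digit count of |n|
    have hVA : pvMaxV (fun k => (mode_digit_loop |n| PySem.Dict.empty).getD k 0) 0
        (mode_digit_loop |n| PySem.Dict.empty).keys
        = pvMaxV (cntD |n|) 0 (mode_digit_loop |n| PySem.Dict.empty).keys := by
      unfold pvMaxV
      exact PySem.List.foldl_congr_mem _ _ _ _ (fun acc x _ => by simp only [hcA])
    have hVeq : pvMaxV (cntD |n|) 0 (mode_digit_loop |n| PySem.Dict.empty).keys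
        = pvMaxV (cntD |n|) 0 (PySem.List.pyRange 9 (-1) (-1)) := by
      apply le_antisymm
      · rcases pvMaxV_cases (cntD |n|) (mode_digit_loop |n| PySem.Dict.empty).keys 0 with h | ⟨k, hk, h⟩
        · rw [h]; exact pvMaxV_base_le _ _ _
        · rw [h]
          have hp := (hK k).mp hk
          have hr := cntD_pos_range |n| k hp
          exact pvMaxV_mem_le _ _ _ _ (PySem.List.mem_pyRange_neg_one.mpr ⟨by omega, by omega⟩)
      · rcases pvMaxV_cases (cntD |n|) (PySem.List.pyRange 9 (-1) (-1)) 0 with h | ⟨d, hd, h⟩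
        · rw [h]; exact pvMaxV_base_le _ _ _
        · rw [h]
          by_cases hp : 0 < cntD |n| d
          · exact pvMaxV_mem_le _ _ _ _ ((hK d).mpr hp)
          · have := pvMaxV_base_le (cntD |n|) (mode_digit_loop |n| PySem.Dict.empty).keys 0
            have := cntD_nonneg |n| d
            omega
    have hV1 : 1 ≤ pvMaxV (cntD |n|) 0 (mode_digit_loop |n| PySem.Dict.empty).keys := by
      have hself := cntD_self_pos |n| hpos
      have hmem : PySem.Int.mod |n| 10 ∈ (mode_digit_loop |n| PySem.Dict.empty).keys :=
        (hK _).mpr hself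
      have := pvMaxV_mem_le (cntD |n|) (mode_digit_loop |n| PySem.Dict.empty).keys 0 _ hmem
      omega
    rw [a1, hVA] at a2 a3 a4
    rw [b1] at b2 b3 b4
    rw [hVeq] at a2 a4
    -- the two selected keys bound each other
    have hMAcnt : cntD |n| ((mode_digit_loop |n| PySem.Dict.empty).keys.foldl
        (pvStepA (fun k => (mode_digit_loop |n| PySem.Dict.empty).getD k 0)) (0, 0)).1
        = pvMaxV (cntD |n|) 0 (PySem.List.pyRange 9 (-1) (-1)) := by
      rw [← hcA]
      exact a2 (by rw [← hVeq]; omega)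
    have hMAr := cntD_pos_range |n| _ (by rw [hMAcnt, ← hVeq]; omega)
    have hMAds : ((mode_digit_loop |n| PySem.Dict.empty).keys.foldl
        (pvStepA (fun k => (mode_digit_loop |n| PySem.Dict.empty).getD k 0)) (0, 0)).1
        ∈ PySem.List.pyRange 9 (-1) (-1) :=
      PySem.List.mem_pyRange_neg_one.mpr ⟨by omega, by omega⟩
    have hMAle := b4 _ hMAds (by rw [← hVeq]; omega) hMAcnt
    have hMBcnt : cntD |n| ((PySem.List.pyRange 9 (-1) (-1)).foldl
        (pvStepB (cntD |n|)) (0, 0)).1 = pvMaxV (cntD |n|) 0 (PySem.List.pyRange 9 (-1) (-1)) := by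
      exact b2 (by rw [← hVeq]; omega)
    have hMBK := (hK _).mpr (by rw [hMBcnt, ← hVeq]; omega)
    have hMBle := a4 _ hMBK (by simp only [hcA]; exact hMBcnt)
    rw [hA hm0, hB]
    omega
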